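-- pv_equiv track=rewrite | github.com/XucroYuri/LocalVideo | backend/app/services/stage_reference_mixin.py | _generate_reference_id
-- ===== SOURCE A (Python) =====
-- def _generate_reference_id(existing_references: list) -> str:
--     existing_ids = set()
--     for reference in existing_references:
--         reference_id = str(reference.get("id", ""))
--         if reference_id.startswith("ref_"):
--             try:
--                 num = int(reference_id.split("_")[1])
--                 existing_ids.add(num)
--             except (ValueError, IndexError):
--                 pass
--
--     next_num = 1
--     while next_num in existing_ids:
--         next_num += 1
--     return f"ref_{next_num:02d}"
-- ===== SOURCE B (Python) =====
-- def _generate_reference_id(existing_references: list) -> str: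
--     nums = []
--     for reference in existing_references:
--         reference_id = str(reference.get("id", ""))
--         if reference_id.startswith("ref_"):
--             try:
--                 nums.append(int(reference_id.split("_")[1]))
--             except (ValueError, IndexError):
--                 pass
--     candidate = 1
--     for n in sorted(nums):
--         if n == candidate:
--             candidate += 1
--         elif n > candidate:
--             break
--     return f"ref_{candidate:02d}"
-- ===== Notes on version B (the rewrite author's own statement) =====
-- stated objective: alternative
-- what changed: Replaces the unbounded while-loop membership probing over a set by sorting the parsed numbers once and walking the sorted list with a moving candidate, breaking at the first gap (skipping duplicates and numbers below the candidate).
import Mathlib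
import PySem

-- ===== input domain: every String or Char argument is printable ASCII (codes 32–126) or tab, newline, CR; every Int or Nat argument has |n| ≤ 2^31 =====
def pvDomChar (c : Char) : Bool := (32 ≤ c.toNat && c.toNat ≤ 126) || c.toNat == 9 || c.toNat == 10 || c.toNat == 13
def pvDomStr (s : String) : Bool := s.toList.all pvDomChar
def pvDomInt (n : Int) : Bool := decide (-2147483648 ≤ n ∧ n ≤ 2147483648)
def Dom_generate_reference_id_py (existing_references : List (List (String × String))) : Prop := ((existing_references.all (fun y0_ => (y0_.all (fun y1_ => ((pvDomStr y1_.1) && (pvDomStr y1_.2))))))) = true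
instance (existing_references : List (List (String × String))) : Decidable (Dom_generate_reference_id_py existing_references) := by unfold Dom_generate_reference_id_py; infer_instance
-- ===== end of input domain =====

-- B replaces A's while-loop probing of a set by sort-then-first-gap over the parsed numbers; same return value, no side effects.
-- ===== PORT A =====
-- f"ref_{n:02d}": exact for the values this code reaches (the loop result is always >= 1)
def pvFmt02 (n : Int) : String :=
  "ref_" ++ (if n < 10 then "0" ++ PySem.Int.toStr n else PySem.Int.toStr n)

-- shared by both ports (the identical lines of both Pythons): reference.get("id",""), startswith "ref_",
-- int(reference_id.split("_")[1]) with ValueError/IndexError -> none.  sep "_" ≠ "" so split? is always some.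
def pvParseRef (reference : List (String × String)) : Option Int :=
  let reference_id := PySem.Dict.getD (PySem.Dict.mk reference) "id" ""
  if PySem.Str.startswith reference_id "ref_" then
    match PySem.List.pyGet? ((PySem.Str.split? reference_id "_").getD []) 1 with
    | none => none
    | some piece => PySem.Int.ofStr? piece
  else none

-- the set `existing_ids` built by A's for-loop
def pvCollectA (existing_references : List (List (String × String))) : PySem.Set Int :=
  existing_references.foldl (fun s reference =>
    match pvParseRef reference with
    | some num => PySem.Set.add s num
    | none => s) PySem.Set.empty

-- `while next_num in existing_ids: next_num += 1`; fuel |existing_ids|+1 always suffices (proved below)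
def pvWhileA : Nat → Int → PySem.Set Int → Int
  | 0, n, _ => n
  | fuel+1, n, s => if PySem.Set.contains s n then pvWhileA fuel (n+1) s else n

def generate_reference_id_py (existing_references : List (List (String × String))) : String :=
  let existing_ids := pvCollectA existing_references
  pvFmt02 (pvWhileA (existing_ids.length + 1) 1 existing_ids)

-- ===== PORT B =====
-- the list `nums` built by B's for-loop (same parsing, a list instead of a set)
def pvCollectB (existing_references : List (List (String × String))) : List Int :=
  existing_references.foldl (fun acc reference =>
    match pvParseRef reference with
    | some num => acc ++ [num]
    | none => acc) []

-- B's for-loop over the sorted list: advance the candidate on a match, break at the first gap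
def pvWalkB : List Int → Int → Int
  | [], c => c
  | n :: t, c => if n = c then pvWalkB t (c+1) else if n > c then c else pvWalkB t c

def generate_reference_id_py_alt (existing_references : List (List (String × String))) : String :=
  let nums := pvCollectB existing_references
  pvFmt02 (pvWalkB (PySem.List.sorted nums (fun x => x) false) 1)

-- ===== PRECONDITION & SPEC =====
def Spec_generate_reference_id_py (existing_references : List (List (String × String))) (out : String) : Prop := out = generate_reference_id_py_alt existing_references
instance (existing_references : List (List (String × String))) (out : String) : Decidable (Spec_generate_reference_id_py existing_references out) := by unfold Spec_generate_reference_id_py; infer_instance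

-- ===== CLAIM (what is proved, stated in full; the proofs are below) =====
def Claim_equal_generate_reference_id_py : Prop := ∀ (existing_references : List (List (String × String))), Dom_generate_reference_id_py existing_references → Spec_generate_reference_id_py existing_references (generate_reference_id_py existing_references)

-- ===== LEMMAS AND PROOFS =====

-- "r is the least integer ≥ n outside P"
def pvRS (n r : Int) (P : Int → Prop) : Prop := n ≤ r ∧ ¬ P r ∧ ∀ k, n ≤ k → k < r → P k

theorem pvRS_unique {n r1 r2 : Int} {P Q : Int → Prop} (h1 : pvRS n r1 P) (h2 : pvRS n r2 Q)
    (hpq : ∀ x, P x ↔ Q x) : r1 = r2 := by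
  obtain ⟨hn1, hr1, hi1⟩ := h1
  obtain ⟨hn2, hr2, hi2⟩ := h2
  rcases lt_trichotomy r1 r2 with h | h | h
  · exact absurd ((hpq r1).mpr (hi2 r1 hn1 h)) hr1
  · exact h
  · exact absurd ((hpq r2).mp (hi1 r2 hn2 h)) hr2

theorem pvCountP_mono (s : List Int) (c : Int) :
    s.countP (fun x => decide (c + 1 ≤ x)) ≤ s.countP (fun x => decide (c ≤ x)) := by
  apply List.countP_mono_left
  intro x _ hx
  simp only [decide_eq_true_eq] at *
  omega

theorem pvCountP_lt (s : List Int) (c : Int) (h : c ∈ s) :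
    s.countP (fun x => decide (c + 1 ≤ x)) < s.countP (fun x => decide (c ≤ x)) := by
  induction s with
  | nil => cases h
  | cons a t ih =>
    simp only [List.countP_cons]
    have hle : (if decide (c + 1 ≤ a) = true then 1 else 0) ≤ (if decide (c ≤ a) = true then 1 else 0) := by
      split_ifs <;> simp_all <;> omega
    rcases List.mem_cons.mp h with heq | hmem
    · subst heq
      have hm := pvCountP_mono t c
      rw [if_neg (by simp), if_pos (by simp)]
      omega
    · have := ih hmem
      omega

theorem pvWhileA_spec : ∀ (f : Nat) (n : Int) (s : PySem.Set Int),
    s.countP (fun x => decide (n ≤ x)) < f → pvRS n (pvWhileA f n s) (· ∈ s) := by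
  intro f
  induction f with
  | zero => intro n s h; omega
  | succ f ih =>
    intro n s h
    rw [pvWhileA]
    by_cases hmem : n ∈ s
    · rw [if_pos (by simpa [PySem.Set.contains_iff] using hmem)]
      have hlt : s.countP (fun x => decide (n + 1 ≤ x)) < f :=
        lt_of_lt_of_le (pvCountP_lt s n hmem) (by omega)
      obtain ⟨h1, h2, h3⟩ := ih (n+1) s hlt
      refine ⟨by omega, h2, fun k hk1 hk2 => ?_⟩
      rcases eq_or_lt_of_le hk1 with rfl | hk
      · exact hmem
      · exact h3 k (by omega) hk2
    · rw [if_neg (by simpa [PySem.Set.contains_iff] using hmem)]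
      exact ⟨le_refl n, hmem, fun k hk1 hk2 => absurd hk2 (by omega)⟩

theorem pvWalkB_spec : ∀ (l : List Int) (c : Int), l.Pairwise (· ≤ ·) →
    pvRS c (pvWalkB l c) (· ∈ l) := by
  intro l
  induction l with
  | nil =>
    intro c _
    rw [pvWalkB]
    exact ⟨le_refl c, by simp, fun k hk1 hk2 => absurd hk2 (by omega)⟩
  | cons n t ih =>
    intro c hp
    have hp' := List.pairwise_cons.mp hp
    rw [pvWalkB]
    by_cases h1 : n = c
    · subst h1
      rw [if_pos rfl]
      obtain ⟨ha, hb, hc⟩ := ih (n+1) hp'.2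
      refine ⟨by omega, ?_, fun k hk1 hk2 => ?_⟩
      · simp only [List.mem_cons, not_or]
        exact ⟨by omega, hb⟩
      · rcases eq_or_lt_of_le hk1 with rfl | hk
        · exact List.mem_cons_self
        · exact List.mem_cons_of_mem _ (hc k (by omega) hk2)
    · rw [if_neg h1]
      by_cases h2 : n > c
      · rw [if_pos h2]
        refine ⟨le_refl c, ?_, fun k hk1 hk2 => absurd hk2 (by omega)⟩
        simp only [List.mem_cons, not_or]
        exact ⟨by omega, fun hmem => by have := hp'.1 c hmem; omega⟩
      · rw [if_neg h2]
        obtain ⟨ha, hb, hc⟩ := ih c hp'.2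
        refine ⟨ha, ?_, fun k hk1 hk2 => List.mem_cons_of_mem _ (hc k hk1 hk2)⟩
        simp only [List.mem_cons, not_or]
        exact ⟨by omega, hb⟩

theorem pvCollect_mem (existing_references : List (List (String × String))) :
    ∀ x, x ∈ pvCollectA existing_references ↔ x ∈ pvCollectB existing_references := by
  unfold pvCollectA pvCollectB
  suffices h : ∀ (l : List (List (String × String))) (s : PySem.Set Int) (acc : List Int),
      (∀ x, x ∈ s ↔ x ∈ acc) →
      ∀ x, x ∈ l.foldl (fun s reference =>
        match pvParseRef reference with
        | some num => PySem.Set.add s num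
        | none => s) s ↔ x ∈ l.foldl (fun acc reference =>
        match pvParseRef reference with
        | some num => acc ++ [num]
        | none => acc) acc by
    exact h existing_references PySem.Set.empty [] (by simp [PySem.Set.empty])
  intro l
  induction l with
  | nil => intro s acc h x; simpa using h x
  | cons r t ih =>
    intro s acc h x
    simp only [List.foldl_cons]
    cases hr : pvParseRef r with
    | none => exact ih s acc h x
    | some num =>
      apply ih
      intro y
      simp [PySem.Set.mem_add, h y]

-- ===== VERDICT (by name: the statement is the Claim_ definition above) =====
theorem generate_reference_id_py_spec : Claim_equal_generate_reference_id_py := by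
  intro refs _
  unfold Spec_generate_reference_id_py generate_reference_id_py generate_reference_id_py_alt
  apply congrArg pvFmt02
  have hA : pvRS 1 (pvWhileA ((pvCollectA refs).length + 1) 1 (pvCollectA refs)) (· ∈ pvCollectA refs) :=
    pvWhileA_spec _ 1 _ (Nat.lt_succ_of_le List.countP_le_length)
  have hB : pvRS 1 (pvWalkB (PySem.List.sorted (pvCollectB refs) (fun x => x) false) 1)
      (· ∈ PySem.List.sorted (pvCollectB refs) (fun x => x) false) :=
    pvWalkB_spec _ 1 (PySem.List.sorted_pairwise (pvCollectB refs) (fun x => x))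
  exact pvRS_unique hA hB (fun x => by rw [pvCollect_mem refs x, PySem.List.mem_sorted])
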